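-- pv_equiv track=rewrite | github.com/xorchi/Termux-Autobackup | utils/bip39cli.py | _bech32_encode
-- ===== SOURCE A (Python) =====
-- _BC='qpzry9x8gf2tvdw0s3jn54khce6mua7l'
--
-- def _bech32_encode(hrp, prog, witver=0, const=1):
--     def conv(d,f,t):
--         acc=bits=0; r=[]
--         for v in d:
--             acc=(acc<<f)|v; bits+=f
--             while bits>=t: bits-=t; r.append((acc>>bits)&((1<<t)-1))
--         if bits: r.append((acc<<(t-bits))&((1<<t)-1))
--         return r
--     data=[witver]+conv(prog,8,5)
--     ex=[ord(c)>>5 for c in hrp]+[0]+[ord(c)&31 for c in hrp]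
--     def pm(v):
--         GEN=[0x3b6a57b2,0x26508e6d,0x1ea119fa,0x3d4233dd,0x2a1462b3]; c=1
--         for vv in v:
--             b=c>>25; c=(c&0x1ffffff)<<5^vv
--             for i in range(5):
--                 if (b>>i)&1: c^=GEN[i]
--         return c
--     p=pm(ex+data+[0]*6)^const
--     return hrp+'1'+''.join(_BC[d] for d in data)+''.join(_BC[(p>>5*i)&31] for i in range(5,-1,-1))
-- ===== SOURCE B (Python) =====
-- _BC='qpzry9x8gf2tvdw0s3jn54khce6mua7l'
--
-- def _bech32_encode(hrp, prog, witver=0, const=1):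
--     # Regroup 8->5 by indexed extraction: build prefix accumulators once, then
--     # take each 5-bit symbol j straight out of the prefix that completes it.
--     pref = [0]
--     for v in prog:
--         pref.append((pref[-1] << 8) | v)
--     n = len(prog)
--     nsym = (8 * n) // 5
--     data = [witver]
--     for jm in range(nsym):
--         j = jm + 1
--         k = (5 * j + 7) // 8            # bytes consumed when symbol j is complete
--         data.append((pref[k] >> (8 * k - 5 * j)) & 31)
--     if (8 * n) % 5:
--         data.append((pref[n] << (5 - (8 * n) % 5)) & 31)
--     ex = [ord(c) >> 5 for c in hrp] + [0] + [ord(c) & 31 for c in hrp]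
--     GEN = [0x3b6a57b2, 0x26508e6d, 0x1ea119fa, 0x3d4233dd, 0x2a1462b3]
--     T = []
--     for b in range(32):
--         t = 0
--         for i in range(5):
--             if (b >> i) & 1:
--                 t ^= GEN[i]
--         T.append(t)
--     c = 1
--     for vv in ex + data + [0] * 6:
--         c = (((c & 0x1ffffff) << 5) ^ vv) ^ T[(c >> 25) & 31]
--     p = c ^ const
--     return hrp + '1' + ''.join(_BC[d] for d in data) + ''.join(_BC[(p >> 5 * i) & 31] for i in range(5, -1, -1))
-- ===== Notes on version B (the rewrite author's own statement) =====
-- stated objective: alternative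
-- what changed: The 8-to-5-bit regrouping is rewritten as indexed extraction: one pass builds prefix accumulators, then each 5-bit symbol j is shifted/masked directly out of the prefix that completes it (instead of A's streaming acc/bits while-loop), and the polymod inner range(5) XOR loop is replaced by a precomputed 32-entry table indexed by the top 5 bits.
import Mathlib
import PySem

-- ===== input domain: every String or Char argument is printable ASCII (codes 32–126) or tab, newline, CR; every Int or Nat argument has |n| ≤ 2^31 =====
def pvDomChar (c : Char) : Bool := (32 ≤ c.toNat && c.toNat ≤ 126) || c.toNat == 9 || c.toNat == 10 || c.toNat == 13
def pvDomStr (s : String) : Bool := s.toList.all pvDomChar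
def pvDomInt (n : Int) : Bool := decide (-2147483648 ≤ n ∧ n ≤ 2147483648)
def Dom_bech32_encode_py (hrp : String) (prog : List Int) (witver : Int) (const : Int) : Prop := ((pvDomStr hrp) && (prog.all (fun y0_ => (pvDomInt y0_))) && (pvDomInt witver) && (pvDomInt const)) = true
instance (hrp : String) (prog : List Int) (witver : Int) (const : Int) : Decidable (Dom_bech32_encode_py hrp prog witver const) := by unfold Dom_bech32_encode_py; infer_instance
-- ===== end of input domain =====

-- B re-derives the 8→5-bit regrouping by indexed extraction from prefix accumulators
-- (instead of A's streaming while-loop) and replaces the inner polymod GEN loop by a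
-- precomputed 32-entry table; objective: alternative decomposition, same cost.

-- ===== PORT A =====
def pvBC : List Char := "qpzry9x8gf2tvdw0s3jn54khce6mua7l".toList
def pvGEN : List Int := [0x3b6a57b2, 0x26508e6d, 0x1ea119fa, 0x3d4233dd, 0x2a1462b3]

-- inner 'while bits>=t' of conv, with f=8, t=5 as called in A
def pvConvWhile (acc : Int) (bits : Nat) (r : List Int) : Nat × List Int :=
  if bits ≥ 5 then pvConvWhile acc (bits - 5) (r ++ [PySem.Int.band (acc >>> (bits - 5)) 31])
  else (bits, r)
termination_by bits

-- 'for v in d' of conv: state (acc, bits, r)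
def pvConvLoop : List Int → Int → Nat → List Int → Int × Nat × List Int
  | [], acc, bits, r => (acc, bits, r)
  | v :: vs, acc, bits, r =>
    let acc' := PySem.Int.bor (acc <<< 8) v
    let br := pvConvWhile acc' (bits + 8) r
    pvConvLoop vs acc' br.1 br.2

def pvConv (d : List Int) : List Int :=
  let s := pvConvLoop d 0 0 []
  if s.2.1 ≠ 0 then s.2.2 ++ [PySem.Int.band (s.1 <<< (5 - s.2.1)) 31] else s.2.2

def pvPm (v : List Int) : Int :=
  v.foldl (fun c vv =>
    let b := c >>> 25
    let c1 := PySem.Int.bxor ((PySem.Int.band c 0x1ffffff) <<< 5) vv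
    (List.range 5).foldl (fun c2 (i : Nat) =>
      if PySem.Int.band (b >>> i) 1 ≠ 0 then PySem.Int.bxor c2 (pvGEN.getD i 0) else c2) c1) 1

def bech32_encode_py (hrp : String) (prog : List Int) (witver : Int) (const : Int) : String :=
  let data := witver :: pvConv prog
  let ex := hrp.toList.map (fun ch => ((ch.toNat : Int)) >>> 5) ++ [0]
            ++ hrp.toList.map (fun ch => PySem.Int.band ((ch.toNat : Int)) 31)
  let p := PySem.Int.bxor (pvPm (ex ++ data ++ List.replicate 6 0)) const
  String.ofList (hrp.toList ++ ['1']
    ++ data.map (fun d => PySem.List.pyGetD pvBC d '?')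
    ++ (PySem.List.pyRange 5 (-1) (-1)).map
         (fun i => PySem.List.pyGetD pvBC (PySem.Int.band (p >>> (5 * i).toNat) 31) '?'))

-- ===== PORT B =====
-- prefix accumulators: pref[k] = first k bytes shifted together
def pvPref (prog : List Int) : List Int :=
  prog.foldl (fun ps v => ps ++ [PySem.Int.bor ((PySem.List.pyGetD ps (-1) 0) <<< 8) v]) [0]

def pvDataAlt (prog : List Int) (witver : Int) : List Int :=
  let pref := pvPref prog
  let n := prog.length
  let nsym := (8 * n) / 5
  let main := (List.range nsym).map (fun jm =>
    let j : Nat := jm + 1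
    let k : Nat := (5 * j + 7) / 8
    PySem.Int.band ((PySem.List.pyGetD pref (k : Int) 0) >>> (8 * k - 5 * j)) 31)
  let tail := if (8 * n) % 5 ≠ 0 then
      [PySem.Int.band ((PySem.List.pyGetD pref (n : Int) 0) <<< (5 - (8 * n) % 5)) 31]
    else []
  witver :: (main ++ tail)

def pvT : List Int := (List.range 32).map (fun b =>
  (List.range 5).foldl (fun t i =>
    if (b >>> i) &&& 1 ≠ 0 then PySem.Int.bxor t (pvGEN.getD i 0) else t) 0)

def pvPmT (v : List Int) : Int :=
  v.foldl (fun c vv =>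
    PySem.Int.bxor (PySem.Int.bxor ((PySem.Int.band c 0x1ffffff) <<< 5) vv)
      (PySem.List.pyGetD pvT (PySem.Int.band (c >>> 25) 31) 0)) 1

def bech32_encode_py_alt (hrp : String) (prog : List Int) (witver : Int) (const : Int) : String :=
  let data := pvDataAlt prog witver
  let ex := hrp.toList.map (fun ch => ((ch.toNat : Int)) >>> 5) ++ [0]
            ++ hrp.toList.map (fun ch => PySem.Int.band ((ch.toNat : Int)) 31)
  let p := PySem.Int.bxor (pvPmT (ex ++ data ++ List.replicate 6 0)) const
  String.ofList (hrp.toList ++ ['1']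
    ++ data.map (fun d => PySem.List.pyGetD pvBC d '?')
    ++ (PySem.List.pyRange 5 (-1) (-1)).map
         (fun i => PySem.List.pyGetD pvBC (PySem.Int.band (p >>> (5 * i).toNat) 31) '?'))

-- ===== PRECONDITION & SPEC =====
-- Pre_ excludes exactly the inputs where A raises IndexError: _BC[witver] needs -32 ≤ witver < 32
-- (every other _BC index is masked with &31 and in range).
def Pre_bech32_encode_py (hrp : String) (prog : List Int) (witver : Int) (const : Int) : Prop :=
  PySem.Raise.InRange pvBC.length witver
instance (hrp : String) (prog : List Int) (witver : Int) (const : Int) : Decidable (Pre_bech32_encode_py hrp prog witver const) := by unfold Pre_bech32_encode_py; infer_instance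

def pvWitness_bech32_encode_py : String × List Int × Int × Int := ("bc", [0, 14, 20, 251], 0, 1)

def Spec_bech32_encode_py (hrp : String) (prog : List Int) (witver : Int) (const : Int) (out : String) : Prop := out = bech32_encode_py_alt hrp prog witver const
instance (hrp : String) (prog : List Int) (witver : Int) (const : Int) (out : String) : Decidable (Spec_bech32_encode_py hrp prog witver const out) := by unfold Spec_bech32_encode_py; infer_instance

-- ===== CLAIM (what is proved, stated in full; the proofs are below) =====
def Claim_equal_bech32_encode_py : Prop := ∀ (hrp : String) (prog : List Int) (witver : Int) (const : Int), Dom_bech32_encode_py hrp prog witver const → Pre_bech32_encode_py hrp prog witver const → Spec_bech32_encode_py hrp prog witver const (bech32_encode_py hrp prog witver const)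

-- ===== LEMMAS AND PROOFS =====

-- the big-int accumulator of a byte list
def pvAcc (d : List Int) : Int := d.foldl (fun a v => PySem.Int.bor (a <<< 8) v) 0

-- B's symbol j (1-based), as a function of the byte list
def pvSym (d : List Int) (j : Nat) : Int :=
  PySem.Int.band ((pvAcc (d.take ((5 * j + 7) / 8))) >>> (8 * ((5 * j + 7) / 8) - 5 * j)) 31

-- ---- bit-level facts ----
lemma pv_nat_and31 (n : Nat) : n &&& 31 = n % 32 := by
  have := Nat.and_two_pow_sub_one_eq_mod n 5; norm_num at this; exact this

lemma pv_band31 (x : Int) : PySem.Int.band x 31 = x % 32 := by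
  unfold PySem.Int.band
  by_cases hx : 0 ≤ x
  · simp [hx]; rw [pv_nat_and31]; omega
  · simp [hx]; rw [Nat.and_comm 31, pv_nat_and31]
    have h := Nat.mod_lt ((-x).toNat - 1) (show 0 < 32 by norm_num)
    omega

lemma pv_bxor_nonneg (x y : Int) (hx : 0 ≤ x) (hy : 0 ≤ y) : 0 ≤ PySem.Int.bxor x y := by
  unfold PySem.Int.bxor; simp [hx, hy]

lemma pv_bxor_assoc_right (x g h : Int) (hg : 0 ≤ g) (hh : 0 ≤ h) :
    PySem.Int.bxor (PySem.Int.bxor x g) h = PySem.Int.bxor x (PySem.Int.bxor g h) := by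
  unfold PySem.Int.bxor
  by_cases hx : 0 ≤ x
  · simp [hx, hg, hh, Nat.xor_assoc]
  · simp [hx, hg, hh]
    rw [if_neg (by have := Int.natCast_nonneg ((-x).toNat - 1 ^^^ g.toNat); omega)]
    rw [Nat.xor_assoc]

lemma pv_bit_equiv (b : Int) (i : Nat) (hi : i < 5) :
    (PySem.Int.band (b >>> i) 1 ≠ 0) = ((((PySem.Int.band b 31).toNat) >>> i) &&& 1 ≠ 0) := by
  have hM : ((PySem.Int.band b 31).toNat : Int) = b % 32 := by
    rw [pv_band31]; omega
  rw [PySem.Int.band_one, PySem.Int.mod_eq_emod_of_pos (by norm_num),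
      Int.shiftRight_eq_div_pow, Nat.shiftRight_eq_div_pow, Nat.and_one_is_mod]
  apply propext
  interval_cases i <;> (norm_num; omega)

-- ---- polymod: A's inner GEN loop is B's table lookup ----
lemma pv_gen_nonneg (i : Nat) : 0 ≤ pvGEN.getD i 0 := by
  match i with
  | 0 | 1 | 2 | 3 | 4 => decide
  | n + 5 => simp [pvGEN, List.getD]

def pvFold5 (cond : Nat → Prop) [DecidablePred cond] (l : List Nat) (x : Int) : Int :=
  l.foldl (fun c i => if cond i then PySem.Int.bxor c (pvGEN.getD i 0) else c) x

lemma pv_fold5_nonneg (cond : Nat → Prop) [DecidablePred cond] (l : List Nat) (x : Int)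
    (hx : 0 ≤ x) : 0 ≤ pvFold5 cond l x := by
  induction l generalizing x with
  | nil => exact hx
  | cons i t ih =>
    simp only [pvFold5, List.foldl_cons] at *
    split
    · exact ih _ (pv_bxor_nonneg _ _ hx (pv_gen_nonneg i))
    · exact ih _ hx

lemma pv_fold5_shift (cond : Nat → Prop) [DecidablePred cond] (l : List Nat) (x : Int) :
    pvFold5 cond l x = PySem.Int.bxor x (pvFold5 cond l 0) := by
  induction l generalizing x with
  | nil => simp [pvFold5, PySem.Int.bxor_zero]
  | cons i t ih =>
    simp only [pvFold5, List.foldl_cons] at *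
    by_cases h : cond i
    · rw [if_pos h, if_pos h, ih, ih (PySem.Int.bxor 0 _)]
      rw [PySem.Int.bxor_comm 0, PySem.Int.bxor_zero]
      exact pv_bxor_assoc_right _ _ _ (pv_gen_nonneg i) (pv_fold5_nonneg cond t 0 le_rfl)
    · rw [if_neg h, if_neg h, ih]

lemma pv_T_lookup (b : Int) :
    PySem.List.pyGetD pvT (PySem.Int.band b 31) 0
      = pvFold5 (fun i => ((PySem.Int.band b 31).toNat >>> i) &&& 1 ≠ 0) (List.range 5) 0 := by
  have h0 : 0 ≤ PySem.Int.band b 31 := by rw [pv_band31]; omega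
  have h1 : (PySem.Int.band b 31).toNat < 32 := by have := pv_band31 b; omega
  rw [PySem.List.pyGetD_eq_getElem pvT 0 h0
        (by simp only [pvT, List.length_map, List.length_range]; omega)]
  simp only [pvT, List.getElem_map, List.getElem_range]
  rfl

lemma pv_step_eq (c vv : Int) :
    pvFold5 (fun i => PySem.Int.band ((c >>> 25) >>> i) 1 ≠ 0) (List.range 5)
        (PySem.Int.bxor ((PySem.Int.band c 0x1ffffff) <<< 5) vv)
      = PySem.Int.bxor (PySem.Int.bxor ((PySem.Int.band c 0x1ffffff) <<< 5) vv)
          (PySem.List.pyGetD pvT (PySem.Int.band (c >>> 25) 31) 0) := by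
  rw [pv_fold5_shift, pv_T_lookup]
  congr 1
  have e0 := pv_bit_equiv (c >>> 25) 0 (by norm_num)
  have e1 := pv_bit_equiv (c >>> 25) 1 (by norm_num)
  have e2 := pv_bit_equiv (c >>> 25) 2 (by norm_num)
  have e3 := pv_bit_equiv (c >>> 25) 3 (by norm_num)
  have e4 := pv_bit_equiv (c >>> 25) 4 (by norm_num)
  show pvFold5 _ [0, 1, 2, 3, 4] 0 = pvFold5 _ [0, 1, 2, 3, 4] 0
  simp only [pvFold5, List.foldl_cons, List.foldl_nil, e0, e1, e2, e3, e4]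

lemma pv_pm_eq (v : List Int) : pvPm v = pvPmT v := by
  unfold pvPm pvPmT
  congr 1
  funext c vv
  exact pv_step_eq c vv

-- ---- conv: A's streaming loop computes B's indexed symbols ----
lemma pv_while_step (acc : Int) (r : List Int) (b0 : Nat) (hb : b0 < 5) :
    pvConvWhile acc (b0 + 8) r =
      ((b0 + 8) % 5,
        r ++ (if b0 < 2 then [PySem.Int.band (acc >>> (b0 + 3)) 31]
              else [PySem.Int.band (acc >>> (b0 + 3)) 31, PySem.Int.band (acc >>> (b0 - 2)) 31])) := by
  interval_cases b0 <;>
    (rw [pvConvWhile]; norm_num; rw [pvConvWhile]; norm_num) <;>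
    (try (rw [pvConvWhile]; norm_num))

lemma pv_loop_append (ds : List Int) (v : Int) :
    ∀ (acc : Int) (bits : Nat) (r : List Int),
    pvConvLoop (ds ++ [v]) acc bits r =
      (let s := pvConvLoop ds acc bits r
       let acc' := PySem.Int.bor (s.1 <<< 8) v
       let w := pvConvWhile acc' (s.2.1 + 8) s.2.2
       (acc', w.1, w.2)) := by
  induction ds with
  | nil => intro acc bits r; rfl
  | cons x t ih => intro acc bits r; simp only [List.cons_append, pvConvLoop]; exact ih _ _ _

lemma pv_acc_append (ds : List Int) (v : Int) :
    pvAcc (ds ++ [v]) = PySem.Int.bor ((pvAcc ds) <<< 8) v := by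
  simp [pvAcc, List.foldl_append]

lemma pv_sym_stable (ds : List Int) (v : Int) (j : Nat) (hj : (5 * j + 7) / 8 ≤ ds.length) :
    pvSym (ds ++ [v]) j = pvSym ds j := by
  unfold pvSym
  rw [List.take_append_of_le_length hj]

lemma pv_conv_loop_spec (d : List Int) :
    pvConvLoop d 0 0 [] =
      (pvAcc d, (8 * d.length) % 5,
        (List.range ((8 * d.length) / 5)).map (fun jm => pvSym d (jm + 1))) := by
  induction d using List.reverseRecOn with
  | nil => rfl
  | append_singleton ds v ih =>
    rw [pv_loop_append, ih]
    simp only []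
    have hlen : (ds ++ [v]).length = ds.length + 1 := by simp
    rw [pv_while_step _ _ _ (by omega), pv_acc_append, hlen]
    have est : List.map (fun jm => pvSym (ds ++ [v]) (jm + 1)) (List.range (8 * ds.length / 5))
        = List.map (fun jm => pvSym ds (jm + 1)) (List.range (8 * ds.length / 5)) := by
      apply List.map_congr_left
      intro jm hjm
      rw [List.mem_range] at hjm
      rw [pv_sym_stable _ _ _ (by omega)]
    have ht : (ds ++ [v]).take (ds.length + 1) = ds ++ [v] := by
      rw [← hlen]; exact List.take_length
    by_cases hb : (8 * ds.length) % 5 < 2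
    · rw [if_pos hb]
      have hn : (8 * (ds.length + 1)) / 5 = (8 * ds.length) / 5 + 1 := by omega
      have e1 : pvSym (ds ++ [v]) ((8 * ds.length) / 5 + 1)
          = PySem.Int.band ((PySem.Int.bor ((pvAcc ds) <<< 8) v) >>> ((8 * ds.length) % 5 + 3)) 31 := by
        unfold pvSym
        rw [show (5 * ((8 * ds.length) / 5 + 1) + 7) / 8 = ds.length + 1 from by omega, ht,
            pv_acc_append,
            show 8 * (ds.length + 1) - 5 * ((8 * ds.length) / 5 + 1) = (8 * ds.length) % 5 + 3 from by omega]
      refine congrArg₂ Prod.mk rfl (congrArg₂ Prod.mk (by omega) ?_)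
      rw [hn, List.range_succ, List.map_append, est]
      simp only [List.map_cons, List.map_nil, e1]
    · rw [if_neg hb]
      have hn : (8 * (ds.length + 1)) / 5 = (8 * ds.length) / 5 + 2 := by omega
      have e1 : pvSym (ds ++ [v]) ((8 * ds.length) / 5 + 1)
          = PySem.Int.band ((PySem.Int.bor ((pvAcc ds) <<< 8) v) >>> ((8 * ds.length) % 5 + 3)) 31 := by
        unfold pvSym
        rw [show (5 * ((8 * ds.length) / 5 + 1) + 7) / 8 = ds.length + 1 from by omega, ht,
            pv_acc_append,
            show 8 * (ds.length + 1) - 5 * ((8 * ds.length) / 5 + 1) = (8 * ds.length) % 5 + 3 from by omega]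
      have e2 : pvSym (ds ++ [v]) ((8 * ds.length) / 5 + 1 + 1)
          = PySem.Int.band ((PySem.Int.bor ((pvAcc ds) <<< 8) v) >>> ((8 * ds.length) % 5 - 2)) 31 := by
        unfold pvSym
        rw [show (5 * ((8 * ds.length) / 5 + 1 + 1) + 7) / 8 = ds.length + 1 from by omega, ht,
            pv_acc_append,
            show 8 * (ds.length + 1) - 5 * ((8 * ds.length) / 5 + 1 + 1) = (8 * ds.length) % 5 - 2 from by omega]
      refine congrArg₂ Prod.mk rfl (congrArg₂ Prod.mk (by omega) ?_)
      rw [hn, show (8 * ds.length) / 5 + 2 = ((8 * ds.length) / 5 + 1) + 1 from rfl,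
          List.range_succ, List.range_succ, List.map_append, List.map_append, est]
      simp only [List.map_cons, List.map_nil, e1, e2, List.append_assoc, List.cons_append,
        List.nil_append]

lemma pv_pref_spec (prog : List Int) :
    pvPref prog = (List.range (prog.length + 1)).map (fun k => pvAcc (prog.take k)) := by
  induction prog using List.reverseRecOn with
  | nil => rfl
  | append_singleton ds v ih =>
    unfold pvPref at *
    rw [List.foldl_append, ih]
    simp only [List.foldl_cons, List.foldl_nil]
    have hne : (List.range (ds.length + 1)).map (fun k => pvAcc (ds.take k)) ≠ [] := by
      simp
    rw [PySem.List.pyGetD_neg_one _ _ hne, List.getLast_eq_getElem]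
    simp only [List.length_map, List.length_range]
    rw [List.getElem_map, List.getElem_range]
    simp only [Nat.add_sub_cancel, List.take_length]
    have hlen : (ds ++ [v]).length = ds.length + 1 := by simp
    rw [hlen, List.range_succ (n := ds.length + 1), List.map_append]
    congr 1
    · apply List.map_congr_left
      intro k hk
      rw [List.mem_range] at hk
      rw [List.take_append_of_le_length (by omega)]
    · simp only [List.map_cons, List.map_nil]
      rw [show (ds ++ [v]).take (ds.length + 1) = ds ++ [v] from by
            rw [← hlen]; exact List.take_length,
          pv_acc_append]

lemma pv_pref_getD (prog : List Int) (k : Nat) (hk : k ≤ prog.length) :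
    (pvPref prog).getD k 0 = pvAcc (prog.take k) := by
  rw [pv_pref_spec, List.getD_eq_getElem _ _ (by simp; omega), List.getElem_map,
    List.getElem_range]

lemma pv_data_eq (prog : List Int) (witver : Int) :
    witver :: pvConv prog = pvDataAlt prog witver := by
  unfold pvConv pvDataAlt
  rw [pv_conv_loop_spec]
  simp only []
  congr 1
  have hmain : (List.range ((8 * prog.length) / 5)).map (fun jm =>
      PySem.Int.band ((PySem.List.pyGetD (pvPref prog) (((5 * (jm + 1) + 7) / 8 : Nat) : Int) 0)
        >>> (8 * ((5 * (jm + 1) + 7) / 8) - 5 * (jm + 1))) 31)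
      = (List.range ((8 * prog.length) / 5)).map (fun jm => pvSym prog (jm + 1)) := by
    apply List.map_congr_left
    intro jm hjm
    rw [List.mem_range] at hjm
    rw [PySem.List.pyGetD_natCast, pv_pref_getD _ _ (by omega)]
    rfl
  by_cases hb : (8 * prog.length) % 5 ≠ 0
  · rw [if_pos hb, if_pos hb, hmain]
    congr 1
    rw [PySem.List.pyGetD_natCast, pv_pref_getD _ _ le_rfl, List.take_length]
  · rw [if_neg hb, if_neg hb, hmain, List.append_nil]

-- ===== VERDICT (by name: the statement is the Claim_ definition above) =====
theorem bech32_encode_py_spec : Claim_equal_bech32_encode_py := by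
  intro hrp prog witver const _ _
  unfold Spec_bech32_encode_py bech32_encode_py bech32_encode_py_alt
  simp only [pv_data_eq, pv_pm_eq]
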